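-- pv_equiv track=rewrite | github.com/lukeren314/ZotDegree | crawler/scrape_courses.py | get_next_index
-- ===== SOURCE A (Python) =====
-- from typing import Tuple, Dict, Union, List
--
-- def get_next_index(tree_str: List[str], i: int) -> int:
--     nextor = tree_str.find("or ", i)
--     nextand = tree_str.find("and ", i)
--     found = [i for i in (nextor, nextand) if i >= 0]
--     if not found:
--         return len(tree_str)+1
--     nextIndex = min(found)
--     return nextIndex
-- ===== SOURCE B (Python) =====
-- def get_next_index(tree_str, i):
--     for j in range(max(i, 0), len(tree_str)):
--         if tree_str.startswith(("or ", "and "), j):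
--             return j
--     return len(tree_str) + 1
-- ===== Notes on version B (the rewrite author's own statement) =====
-- stated objective: simpler
-- what changed: Replaces the two separate str.find scans plus the filter-and-min over their results with a single left-to-right scan that returns the first position where either token starts; Pre_ excludes negative start indices, outside the function's natural domain, where str.find's slice-style wraparound in A and a plain forward scan in B are both accidental.
-- outside the precondition, e.g. on get_next_index('or x or y', -3): A returns 10, B returns 0
import Mathlib
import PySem

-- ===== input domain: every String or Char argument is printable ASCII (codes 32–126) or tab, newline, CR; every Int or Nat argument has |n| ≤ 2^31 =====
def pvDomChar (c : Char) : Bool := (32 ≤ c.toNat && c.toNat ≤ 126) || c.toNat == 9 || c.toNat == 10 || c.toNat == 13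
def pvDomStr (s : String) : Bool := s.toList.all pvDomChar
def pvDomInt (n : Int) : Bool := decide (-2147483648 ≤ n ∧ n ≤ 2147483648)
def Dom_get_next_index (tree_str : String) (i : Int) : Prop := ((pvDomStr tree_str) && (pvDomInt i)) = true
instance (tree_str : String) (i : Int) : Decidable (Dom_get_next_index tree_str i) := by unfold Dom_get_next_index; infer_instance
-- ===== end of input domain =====

-- B replaces A's two separate str.find scans plus filter-and-min by one left-to-right scan
-- returning the first position where either token starts (simpler; same cost); Pre_ excludes
-- negative start indices, outside the function's natural domain.


-- ===== PORT A =====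
def get_next_index (tree_str : String) (i : Int) : Int :=
  let nextor := PySem.Str.findFrom tree_str "or " i
  let nextand := PySem.Str.findFrom tree_str "and " i
  let found := [nextor, nextand].filter (fun j => decide (0 ≤ j))
  if found.isEmpty then PySem.Str.len tree_str + 1
  else (PySem.List.min? found id).getD 0

-- ===== PORT B =====
-- tree_str.startswith(sub, j): Python reads a negative start as a slice bound (exact port)
def pvStartsAt (cs : List Char) (sub : List Char) (j : Int) : Bool :=
  let start : Int := if j < 0 then max 0 ((cs.length : Int) + j) else j
  PySem.Chars.startswith (cs.drop start.toNat) sub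

def get_next_index_alt (tree_str : String) (i : Int) : Int :=
  let cs := tree_str.toList
  let n : Int := cs.length
  match (PySem.List.pyRange (max i 0) n 1).find?
      (fun j => pvStartsAt cs "or ".toList j || pvStartsAt cs "and ".toList j) with
  | some j => j
  | none => n + 1

-- ===== PRECONDITION & SPEC =====
-- Pre_ excludes negative start indices i (outside the function's natural domain: i is an index
-- into tree_str), where A's str.find slice-style wraparound and B's plain forward scan are both
-- accidental values no caller relies on.
def Pre_get_next_index (tree_str : String) (i : Int) : Prop := 0 ≤ i
instance (tree_str : String) (i : Int) : Decidable (Pre_get_next_index tree_str i) := by unfold Pre_get_next_index; infer_instance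
def pvWitness_get_next_index : String × Int := ("x and y or z", 2)

def Spec_get_next_index (tree_str : String) (i : Int) (out : Int) : Prop := out = get_next_index_alt tree_str i
instance (tree_str : String) (i : Int) (out : Int) : Decidable (Spec_get_next_index tree_str i out) := by unfold Spec_get_next_index; infer_instance

-- ===== CLAIM (what is proved, stated in full; the proofs are below) =====
def Claim_equal_get_next_index : Prop := ∀ (tree_str : String) (i : Int), Dom_get_next_index tree_str i → Pre_get_next_index tree_str i → Spec_get_next_index tree_str i (get_next_index tree_str i)

-- ===== LEMMAS AND PROOFS =====

lemma pvStartsAt_nonneg (cs sub : List Char) (j : Int) (h : 0 ≤ j) :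
    pvStartsAt cs sub j = PySem.Chars.startswith (cs.drop j.toNat) sub := by
  simp [pvStartsAt, not_lt.mpr h]

lemma find?_pyRange_one_eq_none (a b : Int) (p : Int → Bool)
    (h : ∀ x, a ≤ x → x < b → p x = false) :
    (PySem.List.pyRange a b 1).find? p = none := by
  rw [List.find?_eq_none]
  intro x hx
  rw [PySem.List.mem_pyRange_one] at hx
  simp [h x hx.1 hx.2]

lemma find?_pyRange_one_eq_some (a b j : Int) (p : Int → Bool)
    (h1 : a ≤ j) (h2 : j < b) (hj : p j = true)
    (hmin : ∀ x, a ≤ x → x < j → p x = false) :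
    (PySem.List.pyRange a b 1).find? p = some j := by
  have hab : a < b := lt_of_le_of_lt h1 h2
  obtain ⟨m, hm⟩ : ∃ m : Nat, (b - a).toNat = m := ⟨_, rfl⟩
  induction m generalizing a with
  | zero => omega
  | succ m ih =>
    rw [PySem.List.pyRange_one_cons hab, List.find?_cons]
    by_cases hja : j = a
    · subst hja; simp [hj]
    · have : p a = false := hmin a le_rfl (by omega)
      simp only [this]
      exact ih (a + 1) (by omega) (fun x hx => hmin x (by omega)) (by omega) (by omega)

lemma infix_of_prefix_drop (sub t : List Char) (m : Nat) (h : sub <+: t.drop m) :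
    sub <:+: t :=
  (PySem.Chars.isIn_iff_infix sub t).mp
    ((PySem.Chars.exists_prefix_drop_iff_isIn sub t).mp ⟨m, h⟩)

lemma gni_eq (s : String) (i : Int) (h0i : 0 ≤ i) :
    get_next_index s i = get_next_index_alt s i := by
  unfold get_next_index get_next_index_alt
  simp only [PySem.Str.findFrom_eq, PySem.Str.len_eq]
  set cs := s.toList with hcs
  set n : Int := (cs.length : Int) with hn
  set st : Int := if i < 0 then (if i + n < 0 then 0 else i + n) else i with hst
  have hsti : st = max i 0 := by rw [hst]; split_ifs <;> omega
  have hff : ∀ sub : List Char, PySem.Chars.findFrom cs sub i none =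
      if n < st then -1 else
        if PySem.Chars.find (cs.drop st.toNat) sub = -1 then -1
        else st + PySem.Chars.find (cs.drop st.toNat) sub := by
    intro sub
    rw [hst, hn]
    simp only [PySem.Chars.findFrom, Int.toNat_natCast, List.take_length]
  have h0 : 0 ≤ st := by omega
  set p : Int → Bool :=
    fun j => pvStartsAt cs "or ".toList j || pvStartsAt cs "and ".toList j with hp
  have hpN : ∀ j : Int, 0 ≤ j → p j =
      (PySem.Chars.startswith (cs.drop j.toNat) "or ".toList ||
       PySem.Chars.startswith (cs.drop j.toNat) "and ".toList) := by
    intro j hj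
    rw [hp]
    simp only [pvStartsAt_nonneg _ _ _ hj]
  rw [hff, hff, ← hsti]
  by_cases hlt : n < st
  · simp only [if_pos hlt]
    rw [PySem.List.pyRange_one_eq_nil (le_of_lt hlt)]
    simp
  · have hle : st ≤ n := by omega
    simp only [if_neg hlt]
    set k := st.toNat with hkdef
    have hk : (k : Int) = st := Int.toNat_of_nonneg h0
    set t := cs.drop k with ht
    set fo := PySem.Chars.find t "or ".toList with hfo
    set fa := PySem.Chars.find t "and ".toList with hfa
    have hfo1 : -1 ≤ fo := PySem.Chars.neg_one_le_find t _
    have hfa1 : -1 ≤ fa := PySem.Chars.neg_one_le_find t _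
    have htlen : (t.length : Int) = n - st := by
      rw [ht, List.length_drop]; omega
    have hshift : ∀ x : Int, st ≤ x → cs.drop x.toNat = t.drop (x - st).toNat := by
      intro x hx
      rw [ht, List.drop_drop]
      congr 1
      omega
    have hno_or : ∀ m : Nat, (fo = -1 ∨ (m : Int) < fo) → ¬ "or ".toList <+: t.drop m := by
      intro m hm h
      rcases hm with hm | hm
      · exact ((PySem.Chars.find_eq_neg_one_iff t _).mp hm) (infix_of_prefix_drop _ _ _ h)
      · exact (PySem.Chars.find_spec (by omega : (0:Int) ≤ fo)).2 m (by omega) h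
    have hno_and : ∀ m : Nat, (fa = -1 ∨ (m : Int) < fa) → ¬ "and ".toList <+: t.drop m := by
      intro m hm h
      rcases hm with hm | hm
      · exact ((PySem.Chars.find_eq_neg_one_iff t _).mp hm) (infix_of_prefix_drop _ _ _ h)
      · exact (PySem.Chars.find_spec (by omega : (0:Int) ≤ fa)).2 m (by omega) h
    have hfalse : ∀ x : Int, st ≤ x →
        (¬ "or ".toList <+: t.drop (x - st).toNat) →
        (¬ "and ".toList <+: t.drop (x - st).toNat) → p x = false := by
      intro x hx hor hand
      rw [hpN x (by omega)]
      simp only [PySem.Chars.startswith, hshift x hx, Bool.or_eq_false_iff]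
      constructor <;> simp only [Bool.eq_false_iff, Ne, List.isPrefixOf_iff_prefix] <;> assumption
    by_cases hfoe : fo = -1 <;> by_cases hfae : fa = -1
    · -- neither found
      simp only [if_pos hfoe, if_pos hfae]
      rw [find?_pyRange_one_eq_none]
      · simp
      · intro x hx1 hx2
        exact hfalse x hx1 (hno_or _ (Or.inl hfoe)) (hno_and _ (Or.inl hfae))
    · -- only "and "
      have hfa0 : 0 ≤ fa := by omega
      obtain ⟨hpre, _⟩ := PySem.Chars.find_spec (s := t) (sub := "and ".toList) hfa0
      have hlen : (fa : Int) < n - st := by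
        have hne : t.drop fa.toNat ≠ [] := by
          intro hnil; rw [hnil] at hpre
          exact (by decide : "and ".toList ≠ []) (List.prefix_nil.mp hpre)
        have hlt' : fa.toNat < t.length := by
          by_contra h
          exact hne (List.drop_eq_nil_of_le (by omega))
        omega
      have hnn : (0:Int) ≤ st + fa := by omega
      rw [find?_pyRange_one_eq_some (j := st + fa)]
      · simp [hfoe, hfae, hnn, PySem.List.min?]
      · omega
      · omega
      · have heq : cs.drop (st + fa).toNat = t.drop fa.toNat := by
          rw [hshift _ (by omega)]; congr 1; omega
        rw [hpN _ hnn]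
        simp only [heq, PySem.Chars.startswith, Bool.or_eq_true, List.isPrefixOf_iff_prefix]
        exact Or.inr hpre
      · intro x hx1 hx2
        exact hfalse x hx1 (hno_or _ (Or.inl hfoe)) (hno_and _ (Or.inr (by omega)))
    · -- only "or "
      have hfo0 : 0 ≤ fo := by omega
      obtain ⟨hpre, _⟩ := PySem.Chars.find_spec (s := t) (sub := "or ".toList) hfo0
      have hlen : (fo : Int) < n - st := by
        have hne : t.drop fo.toNat ≠ [] := by
          intro hnil; rw [hnil] at hpre
          exact (by decide : "or ".toList ≠ []) (List.prefix_nil.mp hpre)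
        have hlt' : fo.toNat < t.length := by
          by_contra h
          exact hne (List.drop_eq_nil_of_le (by omega))
        omega
      have hnn : (0:Int) ≤ st + fo := by omega
      rw [find?_pyRange_one_eq_some (j := st + fo)]
      · simp [hfoe, hfae, hnn, PySem.List.min?]
      · omega
      · omega
      · have heq : cs.drop (st + fo).toNat = t.drop fo.toNat := by
          rw [hshift _ (by omega)]; congr 1; omega
        rw [hpN _ hnn]
        simp only [heq, PySem.Chars.startswith, Bool.or_eq_true, List.isPrefixOf_iff_prefix]
        exact Or.inl hpre
      · intro x hx1 hx2
        exact hfalse x hx1 (hno_or _ (Or.inr (by omega))) (hno_and _ (Or.inl hfae))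
    · -- both found
      have hfo0 : 0 ≤ fo := by omega
      have hfa0 : 0 ≤ fa := by omega
      obtain ⟨hpreo, _⟩ := PySem.Chars.find_spec (s := t) (sub := "or ".toList) hfo0
      obtain ⟨hprea, _⟩ := PySem.Chars.find_spec (s := t) (sub := "and ".toList) hfa0
      by_cases hcc : fa < fo
      · -- "and " comes first
        have hlen : (fa : Int) < n - st := by
          have hne : t.drop fa.toNat ≠ [] := by
            intro hnil; rw [hnil] at hprea
            exact (by decide : "and ".toList ≠ []) (List.prefix_nil.mp hprea)
          have hlt' : fa.toNat < t.length := by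
            by_contra h
            exact hne (List.drop_eq_nil_of_le (by omega))
          omega
        rw [find?_pyRange_one_eq_some (j := st + fa)]
        · simp [hfoe, hfae, PySem.List.min?, show (0:Int) ≤ st + fo by omega,
            show (0:Int) ≤ st + fa by omega, show st + fa < st + fo by omega]
        · omega
        · omega
        · have heq : cs.drop (st + fa).toNat = t.drop fa.toNat := by
            rw [hshift _ (by omega)]; congr 1; omega
          rw [hpN _ (by omega)]
          simp only [heq, PySem.Chars.startswith, Bool.or_eq_true, List.isPrefixOf_iff_prefix]
          exact Or.inr hprea
        · intro x hx1 hx2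
          exact hfalse x hx1 (hno_or _ (Or.inr (by omega))) (hno_and _ (Or.inr (by omega)))
      · -- "or " comes first (a tie is impossible)
        have hlen : (fo : Int) < n - st := by
          have hne : t.drop fo.toNat ≠ [] := by
            intro hnil; rw [hnil] at hpreo
            exact (by decide : "or ".toList ≠ []) (List.prefix_nil.mp hpreo)
          have hlt' : fo.toNat < t.length := by
            by_contra h
            exact hne (List.drop_eq_nil_of_le (by omega))
          omega
        rw [find?_pyRange_one_eq_some (j := st + fo)]
        · simp [hfoe, hfae, PySem.List.min?, show (0:Int) ≤ st + fo by omega,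
            show (0:Int) ≤ st + fa by omega, show ¬ (st + fa < st + fo) by omega]
        · omega
        · omega
        · have heq : cs.drop (st + fo).toNat = t.drop fo.toNat := by
            rw [hshift _ (by omega)]; congr 1; omega
          rw [hpN _ (by omega)]
          simp only [heq, PySem.Chars.startswith, Bool.or_eq_true, List.isPrefixOf_iff_prefix]
          exact Or.inl hpreo
        · intro x hx1 hx2
          exact hfalse x hx1 (hno_or _ (Or.inr (by omega))) (hno_and _ (Or.inr (by omega)))

-- ===== VERDICT (by name: the statement is the Claim_ definition above) =====
theorem get_next_index_spec : Claim_equal_get_next_index := by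
  intro s i _ hpre
  show get_next_index s i = get_next_index_alt s i
  exact gni_eq s i hpre
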